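-- pv_equiv track=rewrite | github.com/scys12/group-based-skyline-pareto-optimal | util.py | get_top_points_by_approximate
-- ===== SOURCE A (Python) =====
-- from math import comb
--
-- def get_top_points_by_approximate(points, group_size, k):
--     total_points = len(points)
--     LIMIT = 100000000
--     while comb(total_points, group_size) > LIMIT and k < LIMIT:
--         if comb(total_points - 1, group_size) < k:
--             break
--         total_points -= 1
--     return points[:total_points]
-- ===== SOURCE B (Python) =====
-- from math import comb
--
-- def get_top_points_by_approximate(points, group_size, k):
--     # Binary search for the final cut-off instead of decrementing one point at
--     # a time; the loop predicate is monotone in the point count.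
--     LIMIT = 100000000
--     n = len(points)
--
--     def big(t):
--         return comb(t, group_size) > LIMIT and comb(t - 1, group_size) >= k
--
--     if k >= LIMIT or not big(n):
--         return points[:n]
--     lo, hi = 0, n
--     while hi - lo > 1:
--         mid = (lo + hi) // 2
--         if big(mid):
--             hi = mid
--         else:
--             lo = mid
--     return points[:lo]
-- ===== Notes on version B (the rewrite author's own statement) =====
-- stated objective: faster
-- what changed: Replaces the one-at-a-time decrement loop by a binary search for the cut-off point count, using that the loop's continue-condition is monotone in the count.
import Mathlib
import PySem

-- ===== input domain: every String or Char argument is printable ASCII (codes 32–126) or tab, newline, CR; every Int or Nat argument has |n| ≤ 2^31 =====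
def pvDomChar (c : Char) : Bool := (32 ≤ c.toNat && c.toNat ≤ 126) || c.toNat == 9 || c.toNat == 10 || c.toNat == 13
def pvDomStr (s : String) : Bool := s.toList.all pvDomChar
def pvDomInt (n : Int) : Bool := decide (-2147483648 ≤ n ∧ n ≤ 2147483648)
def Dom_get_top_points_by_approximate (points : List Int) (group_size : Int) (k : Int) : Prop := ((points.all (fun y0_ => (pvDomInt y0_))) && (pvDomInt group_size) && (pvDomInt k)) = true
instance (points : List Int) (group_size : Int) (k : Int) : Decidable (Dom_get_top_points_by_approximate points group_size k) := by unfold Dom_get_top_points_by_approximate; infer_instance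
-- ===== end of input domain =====

-- B replaces A's one-step decrement loop by a binary search over the point count
-- (the loop predicate is monotone); objective: faster.

-- math.comb(n, k) for the nonnegative arguments both programs reach inside Pre_
def pyComb (n k : Int) : Int := (Nat.choose n.toNat k.toNat : Int)

lemma pyComb_zero_le (g : Int) : pyComb 0 g ≤ 1 := by
  unfold pyComb
  rcases g.toNat with _ | m <;> simp

-- ===== PORT A =====
def pvALoop (group_size k : Int) (tp : Nat) : Nat :=
  if pyComb (tp : Int) group_size > 100000000 ∧ k < 100000000 then
    if pyComb ((tp : Int) - 1) group_size < k then tp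
    else pvALoop group_size k (tp - 1)
  else tp
termination_by tp
decreasing_by
  rename_i h _
  have h0 := pyComb_zero_le group_size
  rcases tp with _ | t
  · exact absurd h.1 (by push_cast; omega)
  · omega

def get_top_points_by_approximate (points : List Int) (group_size : Int) (k : Int) : List Int :=
  let total_points := points.length
  PySem.List.slice points none (some ((pvALoop group_size k total_points : Nat) : Int))

-- ===== PORT B =====
def pvBig (group_size k : Int) (t : Int) : Bool :=
  pyComb t group_size > 100000000 && pyComb (t - 1) group_size ≥ k

def pvBSearch (group_size k : Int) (lo hi : Nat) : Nat :=
  if hi - lo ≤ 1 then lo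
  else
    let mid := (lo + hi) / 2
    if pvBig group_size k (mid : Int) then pvBSearch group_size k lo mid
    else pvBSearch group_size k mid hi
termination_by hi - lo
decreasing_by all_goals omega

def get_top_points_by_approximate_alt (points : List Int) (group_size : Int) (k : Int) : List Int :=
  let n := points.length
  if k ≥ 100000000 || !pvBig group_size k (n : Int) then
    PySem.List.slice points none (some ((n : Nat) : Int))
  else
    PySem.List.slice points none (some ((pvBSearch group_size k 0 n : Nat) : Int))

-- ===== PRECONDITION & SPEC =====
-- Python's math.comb raises ValueError for a negative group_size; both A and B raise there.
def Pre_get_top_points_by_approximate (points : List Int) (group_size : Int) (k : Int) : Prop :=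
  0 ≤ group_size
instance (points : List Int) (group_size : Int) (k : Int) : Decidable (Pre_get_top_points_by_approximate points group_size k) := by unfold Pre_get_top_points_by_approximate; infer_instance
def pvWitness_get_top_points_by_approximate : List Int × Int × Int := ([1, 2, 3], 2, 1)

def Spec_get_top_points_by_approximate (points : List Int) (group_size : Int) (k : Int) (out : List Int) : Prop := out = get_top_points_by_approximate_alt points group_size k
instance (points : List Int) (group_size : Int) (k : Int) (out : List Int) : Decidable (Spec_get_top_points_by_approximate points group_size k out) := by unfold Spec_get_top_points_by_approximate; infer_instance

-- ===== CLAIM (what is proved, stated in full; the proofs are below) =====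
def Claim_equal_get_top_points_by_approximate : Prop := ∀ (points : List Int) (group_size : Int) (k : Int), Dom_get_top_points_by_approximate points group_size k → Pre_get_top_points_by_approximate points group_size k → Spec_get_top_points_by_approximate points group_size k (get_top_points_by_approximate points group_size k)

-- ===== LEMMAS AND PROOFS =====

lemma pyComb_mono (g : Int) {s t : Int} (h : s ≤ t) : pyComb s g ≤ pyComb t g := by
  unfold pyComb
  exact_mod_cast Nat.choose_le_choose g.toNat (Int.toNat_le_toNat h)

lemma pvBig_mono (g k : Int) {s t : Int} (hs : pvBig g k s = true) (h : s ≤ t) :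
    pvBig g k t = true := by
  unfold pvBig at *
  simp only [Bool.and_eq_true, decide_eq_true_eq] at *
  exact ⟨lt_of_lt_of_le hs.1 (pyComb_mono g h),
         le_trans hs.2 (pyComb_mono g (by omega))⟩

-- A's loop body, reshaped: continue iff k < LIMIT and the predicate pvBig holds.
lemma pvALoop_step (g k : Int) (tp : Nat) :
    pvALoop g k tp =
      if k < 100000000 ∧ pvBig g k (tp : Int) = true then pvALoop g k (tp - 1) else tp := by
  rw [pvALoop]
  unfold pvBig
  by_cases h1 : pyComb (tp : Int) g > 100000000 <;>
    by_cases h2 : k < 100000000 <;>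
      by_cases h3 : pyComb ((tp : Int) - 1) g < k <;>
        simp [h1, h2, h3]

lemma pvBig_pos (g k : Int) {t : Nat} (h : pvBig g k (t : Int) = true) : 0 < t := by
  have h0 := pyComb_zero_le g
  unfold pvBig at h
  simp only [Bool.and_eq_true, decide_eq_true_eq] at h
  rcases t with _ | t
  · exact absurd h.1 (by push_cast; omega)
  · omega

lemma pvALoop_spec (g k : Int) (n : Nat) :
    pvALoop g k n ≤ n ∧ ¬ (k < 100000000 ∧ pvBig g k ((pvALoop g k n : Nat) : Int) = true) ∧
      ∀ s : Nat, pvALoop g k n < s → s ≤ n → (k < 100000000 ∧ pvBig g k (s : Int) = true) := by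
  induction n using Nat.strong_induction_on with
  | _ n ih =>
    rw [pvALoop_step]
    by_cases h : k < 100000000 ∧ pvBig g k (n : Int) = true
    · have hn : 0 < n := pvBig_pos g k h.2
      have IH := ih (n - 1) (by omega)
      rw [if_pos h]
      refine ⟨by omega, IH.2.1, fun s h1 h2 => ?_⟩
      rcases Nat.lt_or_ge s n with hlt | hge
      · exact IH.2.2 s h1 (by omega)
      · have hs : s = n := by omega
        rw [hs]; exact h
    · rw [if_neg h]
      exact ⟨le_refl n, h, fun s h1 h2 => by omega⟩

lemma pvBSearch_spec (g k : Int) (d : Nat) :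
    ∀ lo hi : Nat, hi - lo ≤ d → pvBig g k (lo : Int) = false →
      pvBig g k (hi : Int) = true → lo < hi →
    lo ≤ pvBSearch g k lo hi ∧ pvBSearch g k lo hi < hi ∧
      pvBig g k ((pvBSearch g k lo hi : Nat) : Int) = false ∧
      pvBig g k ((pvBSearch g k lo hi + 1 : Nat) : Int) = true := by
  induction d with
  | zero => intro lo hi hd _ _ hlt; omega
  | succ d ih =>
    intro lo hi hd hlo hhi hlt
    rw [pvBSearch]
    by_cases hbase : hi - lo ≤ 1
    · have he : hi = lo + 1 := by omega
      rw [if_pos hbase]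
      refine ⟨le_refl lo, by omega, hlo, ?_⟩
      rw [← he]; exact hhi
    · rw [if_neg hbase]
      by_cases hmid : pvBig g k (((lo + hi) / 2 : Nat) : Int) = true
      · rw [if_pos hmid]
        have h := ih lo ((lo + hi) / 2) (by omega) hlo hmid (by omega)
        exact ⟨h.1, by omega, h.2.2⟩
      · rw [if_neg hmid]
        have h := ih ((lo + hi) / 2) hi (by omega)
          (by simpa using hmid) hhi (by omega)
        exact ⟨by omega, h.2.1, h.2.2⟩

-- main equality
lemma main_eq (points : List Int) (g k : Int) :
    get_top_points_by_approximate points g k = get_top_points_by_approximate_alt points g k := by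
  unfold get_top_points_by_approximate get_top_points_by_approximate_alt
  simp only []
  by_cases hc : k < 100000000 ∧ pvBig g k ((points.length : Nat) : Int) = true
  · have hcond : (k ≥ 100000000 || !pvBig g k ((points.length : Nat) : Int)) = false := by
      simp [hc.2]; omega
    rw [hcond]
    simp only [Bool.false_eq_true, if_false]
    have hn0 : 0 < points.length := pvBig_pos g k hc.2
    have h0 : pvBig g k ((0 : Nat) : Int) = false := by
      have h0' := pyComb_zero_le g
      unfold pvBig
      simp only [Nat.cast_zero, Bool.and_eq_false_iff, decide_eq_false_iff_not]
      left; omega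
    have hB := pvBSearch_spec g k points.length 0 points.length (by omega) h0 hc.2 hn0
    have hA := pvALoop_spec g k points.length
    have hra : pvBig g k ((pvALoop g k points.length : Nat) : Int) = false := by
      rcases Bool.eq_false_or_eq_true (pvBig g k ((pvALoop g k points.length : Nat) : Int)) with h | h
      · exact absurd ⟨hc.1, h⟩ hA.2.1
      · exact h
    have heq : pvALoop g k points.length = pvBSearch g k 0 points.length := by
      rcases Nat.lt_trichotomy (pvALoop g k points.length) (pvBSearch g k 0 points.length) with h | h | h
      · have hbig := (hA.2.2 _ h (by omega)).2
        rw [hbig] at hB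
        exact absurd hB.2.2.1 (by simp)
      · exact h
      · have hcast : ((pvBSearch g k 0 points.length + 1 : Nat) : Int) ≤ ((pvALoop g k points.length : Nat) : Int) := by
          push_cast; omega
        have hmono := pvBig_mono g k hB.2.2.2 hcast
        rw [hmono] at hra
        exact absurd hra (by simp)
    rw [heq]
  · have hcond : (k ≥ 100000000 || !pvBig g k ((points.length : Nat) : Int)) = true := by
      rcases Bool.eq_false_or_eq_true (pvBig g k ((points.length : Nat) : Int)) with h | h
      · have hk : 100000000 ≤ k := by by_contra hk; exact hc ⟨by omega, h⟩
        simp [h, hk]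
      · simp [h]
    rw [hcond, if_pos rfl]
    have hstop : pvALoop g k points.length = points.length := by
      rw [pvALoop_step]; rw [if_neg hc]
    rw [hstop]

-- ===== VERDICT (by name: the statement is the Claim_ definition above) =====
theorem get_top_points_by_approximate_spec : Claim_equal_get_top_points_by_approximate := by
  intro points group_size k _ _
  unfold Spec_get_top_points_by_approximate
  exact main_eq points group_size k
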